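-- pv_equiv track=rewrite | github.com/ContactEngineering/topobank | topobank/manager/utils.py | surface_collection_name
-- ===== SOURCE A (Python) =====
-- MAX_LENGTH_SURFACE_COLLECTION_NAME = 160
--
-- def surface_collection_name(surface_names, max_total_length=MAX_LENGTH_SURFACE_COLLECTION_NAME):
--     """For a given list of names, return a length-limited collection name."""
--     num_surfaces = len(surface_names)
--     k = 0
--     coll_name_prefix = ""
--     last_coll_name = ""
--     while k < num_surfaces:
--         coll_name_prefix += f"Surface '{surface_names[k]}'"
--         num_rest = num_surfaces - (k + 1)
--         coll_name = coll_name_prefix[:]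
--         if num_rest > 0:
--             coll_name += f" and {num_rest} more"
--         if len(coll_name) > max_total_length:
--             if last_coll_name == "":
--                 coll_name = coll_name_prefix[:max_total_length - 4] + "..."
--             else:
--                 coll_name = last_coll_name
--             break
--         else:
--             last_coll_name = coll_name
--             coll_name_prefix += ", "
--             k += 1  # add one more and try if it still fits
--
--     return coll_name
-- ===== SOURCE B (Python) =====
-- MAX_LENGTH_SURFACE_COLLECTION_NAME = 160
--
--
-- def surface_collection_name(surface_names, max_total_length=MAX_LENGTH_SURFACE_COLLECTION_NAME):
--     """For a given list of names, return a length-limited collection name.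
--
--     Build every candidate display name (one per number of surfaces shown),
--     then pick the longest-prefix candidate that still fits; candidate length
--     is non-decreasing in the number of surfaces shown, so the last fitting
--     candidate is what the incremental scan of A also settles on.
--     """
--     n = len(surface_names)
--     if n == 0:
--         return ""
--     candidates = []
--     shown = []
--     for name in surface_names:
--         shown.append(f"Surface '{name}'")
--         rest = n - len(shown)
--         candidates.append(", ".join(shown) + (f" and {rest} more" if rest else ""))
--     fitting = [c for c in candidates if len(c) <= max_total_length]
--     if fitting:
--         return fitting[-1]
--     return shown[0][:max_total_length - 4] + "..."
-- ===== Notes on version B (the rewrite author's own statement) =====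
-- stated objective: alternative
-- what changed: Instead of A's incremental scan that accumulates a comma-joined prefix string and breaks at the first overflowing candidate (returning the previous one), B materialises the full list of candidate display names, filters them by the length budget and returns the last fitting one (or the truncated first quoted name), relying on candidate length being non-decreasing.
-- outside the precondition, e.g. on surface_collection_name([], 160): A raises UnboundLocalError, B returns ''
-- crash fix: A raises UnboundLocalError on an empty surface_names list; B returns "" there. — e.g. on surface_collection_name([], 160): A raises UnboundLocalError, B returns ""
import Mathlib
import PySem

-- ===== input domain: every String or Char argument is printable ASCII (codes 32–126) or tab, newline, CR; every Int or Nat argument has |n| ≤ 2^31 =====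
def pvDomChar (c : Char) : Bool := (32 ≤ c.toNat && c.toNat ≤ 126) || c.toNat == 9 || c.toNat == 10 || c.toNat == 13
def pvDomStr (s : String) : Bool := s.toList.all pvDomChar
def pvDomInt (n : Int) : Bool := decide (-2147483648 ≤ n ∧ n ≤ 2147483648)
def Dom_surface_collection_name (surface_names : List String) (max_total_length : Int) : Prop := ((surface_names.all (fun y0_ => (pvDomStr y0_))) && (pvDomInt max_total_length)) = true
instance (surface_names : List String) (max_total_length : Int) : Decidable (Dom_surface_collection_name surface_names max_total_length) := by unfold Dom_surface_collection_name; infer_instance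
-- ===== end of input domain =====

-- B replaces A's incremental build-and-break-early scan by: materialise every candidate
-- display name, filter by the length budget and keep the last fitting one, else truncate
-- the first quoted name.  Objective: alternative (same cost, different algorithm shape).

-- shared literal helpers for the f-strings f"Surface '{name}'" and f" and {rest} more"
def pvSq (s : String) : List Char := "Surface '".toList ++ s.toList ++ "'".toList
def pvSfx (r : Nat) : List Char := " and ".toList ++ PySem.Int.toChars (r : Int) ++ " more".toList

-- ===== PORT A =====
-- A's while-loop over k, as structural recursion on the not-yet-consumed names;
-- state = (coll_name_prefix, last_coll_name); on normal loop exit coll_name = last_coll_name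
-- (the [] base case returns the initial "" only for the empty input, excluded by Pre_).
def pvALoop (max_total_length : Int) : List String → List Char → List Char → List Char
  | [], _pfx, last => last
  | name :: rest, pfx, last =>
    let pfx' := pfx ++ pvSq name
    let num_rest := rest.length
    let coll := if num_rest > 0 then pfx' ++ pvSfx num_rest else pfx'
    if (coll.length : Int) > max_total_length then
      (if last = [] then PySem.List.slice pfx' none (some (max_total_length - 4)) ++ "...".toList
       else last)
    else pvALoop max_total_length rest (pfx' ++ ", ".toList) coll

def surface_collection_name (surface_names : List String) (max_total_length : Int) : String :=
  String.ofList (pvALoop max_total_length surface_names [] [])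

-- ===== PORT B =====
-- B's for-loop appending to `candidates` while growing `shown`; n = len(surface_names) is fixed.
def pvBCands (n : Nat) : List String → List (List Char) → List (List Char)
  | [], _shown => []
  | name :: restNames, shown =>
    let shown' := shown ++ [pvSq name]
    let rest := n - shown'.length
    (PySem.Chars.join ", ".toList shown' ++ (if rest ≠ 0 then pvSfx rest else []))
      :: pvBCands n restNames shown'

def surface_collection_name_alt (surface_names : List String) (max_total_length : Int) : String :=
  let n := surface_names.length
  if n = 0 then "" else
  let candidates := pvBCands n surface_names []
  let fitting := candidates.filter (fun c => decide ((c.length : Int) ≤ max_total_length))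
  match fitting.getLast? with
  | some c => String.ofList c
  | none =>
    -- shown[0]: after Source B's loop, shown = surface_names.map pvSq
    String.ofList (PySem.List.slice ((surface_names.map pvSq).headD []) none (some (max_total_length - 4)) ++ "...".toList)

-- ===== PRECONDITION & SPEC =====
-- Pre_ excludes only the empty list, on which Python A raises UnboundLocalError.
def Pre_surface_collection_name (surface_names : List String) (max_total_length : Int) : Prop := surface_names ≠ []
instance (surface_names : List String) (max_total_length : Int) : Decidable (Pre_surface_collection_name surface_names max_total_length) := by unfold Pre_surface_collection_name; infer_instance
def pvWitness_surface_collection_name : List String × Int := (["alpha", "beta"], 160)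

-- A raises UnboundLocalError on an empty surface_names list; B returns "" there.
def Raises_surface_collection_name (surface_names : List String) (max_total_length : Int) : Prop := surface_names = []
instance (surface_names : List String) (max_total_length : Int) : Decidable (Raises_surface_collection_name surface_names max_total_length) := by unfold Raises_surface_collection_name; infer_instance
def pvRaiseWitness_surface_collection_name : List String × Int := ([], 160)
def pvRaiseWitnessOut_surface_collection_name : String := ""

def Spec_surface_collection_name (surface_names : List String) (max_total_length : Int) (out : String) : Prop := out = surface_collection_name_alt surface_names max_total_length
instance (surface_names : List String) (max_total_length : Int) (out : String) : Decidable (Spec_surface_collection_name surface_names max_total_length out) := by unfold Spec_surface_collection_name; infer_instance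

-- ===== CLAIM (what is proved, stated in full; the proofs are below) =====
def Claim_equal_surface_collection_name : Prop := ∀ (surface_names : List String) (max_total_length : Int), Dom_surface_collection_name surface_names max_total_length → Pre_surface_collection_name surface_names max_total_length → Spec_surface_collection_name surface_names max_total_length (surface_collection_name surface_names max_total_length)
def Claim_raises_surface_collection_name : Prop := (∀ (surface_names : List String) (max_total_length : Int), Dom_surface_collection_name surface_names max_total_length → Raises_surface_collection_name surface_names max_total_length → ¬ Pre_surface_collection_name surface_names max_total_length) ∧ (Dom_surface_collection_name (pvRaiseWitness_surface_collection_name.1) (pvRaiseWitness_surface_collection_name.2) ∧ Raises_surface_collection_name (pvRaiseWitness_surface_collection_name.1) (pvRaiseWitness_surface_collection_name.2) ∧ surface_collection_name_alt (pvRaiseWitness_surface_collection_name.1) (pvRaiseWitness_surface_collection_name.2) = pvRaiseWitnessOut_surface_collection_name)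

-- ===== LEMMAS AND PROOFS =====

lemma pvToDigitsCoreLen : ∀ (f n : Nat) (l : List Char), n < f →
    (Nat.toDigitsCore 10 f n l).length = Nat.log 10 n + 1 + l.length := by
  intro f
  induction f with
  | zero => intro n l h; omega
  | succ f ih =>
    intro n l h
    rw [Nat.toDigitsCore]
    by_cases hd : n / 10 = 0
    · have hn : n < 10 := by omega
      simp [hd, Nat.log_eq_zero_iff.mpr (Or.inl hn)]; omega
    · have hn : 10 ≤ n := by
        by_contra hc
        exact hd (Nat.div_eq_of_lt (by omega))
      have hlt : n / 10 < f := lt_of_lt_of_le (Nat.div_lt_self (by omega) (by omega)) (by omega)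
      simp only [hd, if_false]
      rw [ih (n / 10) _ hlt]
      have hlog : Nat.log 10 n = Nat.log 10 (n / 10) + 1 := by
        rw [Nat.log_div_base]
        have : 0 < Nat.log 10 n := Nat.log_pos (by omega) hn
        omega
      simp only [List.length_cons]; omega

lemma pvToDigitsLen (n : Nat) : (Nat.toDigits 10 n).length = Nat.log 10 n + 1 := by
  have := pvToDigitsCoreLen (n + 1) n [] (by omega)
  simpa [Nat.toDigits] using this

lemma pvLogStep (r : Nat) (h : 2 ≤ r) : Nat.log 10 r ≤ Nat.log 10 (r - 1) + 1 := by
  have h1 : r ≤ (r - 1) * 10 := by omega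
  calc Nat.log 10 r ≤ Nat.log 10 ((r - 1) * 10) := Nat.log_mono_right h1
    _ = Nat.log 10 (r - 1) + 1 := Nat.log_mul_base (by omega) (by omega)

lemma pvSfxLen (r : Nat) : (pvSfx r).length = 10 + (Nat.log 10 r + 1) := by
  have : PySem.Int.toChars (r : Int) = Nat.toDigits 10 r := by
    simp [PySem.Int.toChars]
  simp [pvSfx, this, pvToDigitsLen]; omega

lemma pvSfxStep (r : Nat) (h : 2 ≤ r) : (pvSfx r).length ≤ (pvSfx (r - 1)).length + 1 := by
  have := pvLogStep r h
  simp [pvSfxLen]; omega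

lemma pvJoinSnoc (l : List (List Char)) (x : List Char) (h : l ≠ []) :
    PySem.Chars.join ", ".toList (l ++ [x]) = PySem.Chars.join ", ".toList l ++ ", ".toList ++ x := by
  induction l with
  | nil => simp at h
  | cons a l ih =>
    cases l with
    | nil => simp [PySem.Chars.join, List.intercalate]
    | cons b l' =>
      have h2 := ih (by simp)
      simp only [PySem.Chars.join, List.intercalate, List.cons_append,
        List.intersperse_cons₂, List.flatten_cons] at h2 ⊢
      simpa using h2

def pvCand (n : Nat) (shown : List (List Char)) : List Char :=
  PySem.Chars.join ", ".toList shown ++ (if n - shown.length ≠ 0 then pvSfx (n - shown.length) else [])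

lemma pvSfxNeNil (r : Nat) : pvSfx r ≠ [] := by simp [pvSfx]

lemma pvCandNeNil (n : Nat) (shown : List (List Char)) (h : n - shown.length ≠ 0) :
    pvCand n shown ≠ [] := by
  simp [pvCand, h, pvSfxNeNil]

lemma pvSqLen (s : String) : (pvSq s).length = s.toList.length + 10 := by
  simp [pvSq]

lemma pvCandStep (n : Nat) (shown : List (List Char)) (name : String)
    (hne : shown ≠ []) (hlen : shown.length + 1 ≤ n) :
    (pvCand n shown).length ≤ (pvCand n (shown ++ [pvSq name])).length := by
  have hj := pvJoinSnoc shown (pvSq name) hne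
  have hq := pvSqLen name
  by_cases hr : n - (shown.length + 1) = 0
  · -- last step: suffix disappears
    have h1 : n - shown.length = 1 := by omega
    have hs1 : (pvSfx 1).length = 11 := by simp [pvSfxLen]
    simp only [pvCand, hj, h1, List.length_append]
    simp [hr, hs1]
    omega
  · have h2 : 2 ≤ n - shown.length := by omega
    have hstep := pvSfxStep (n - shown.length) h2
    have hr' : n - (shown.length + 1) = n - shown.length - 1 := by omega
    simp only [pvCand, hj, List.length_append]
    have hns : n - shown.length ≠ 0 := by omega
    have hr2 : n - shown.length - 1 ≠ 0 := by omega
    simp [hns, hr', hr2]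
    omega

lemma pvBCandsCons (n : Nat) (x : String) (xs : List String) (shown : List (List Char)) :
    pvBCands n (x :: xs) shown
      = pvCand n (shown ++ [pvSq x]) :: pvBCands n xs (shown ++ [pvSq x]) := by
  simp [pvBCands, pvCand]

lemma pvCandMono (rem : List String) : ∀ (n : Nat) (shown : List (List Char)), shown ≠ [] →
    n = shown.length + rem.length →
    ∀ c ∈ pvBCands n rem shown, (pvCand n shown).length ≤ c.length := by
  induction rem with
  | nil => intro n shown _ _ c hc; simp [pvBCands] at hc
  | cons x xs ih =>
    intro n shown hne hn c hc
    rw [pvBCandsCons] at hc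
    have hstep := pvCandStep n shown x hne (by simp at hn; omega)
    rcases List.mem_cons.mp hc with h | h
    · exact h ▸ hstep
    · exact le_trans hstep (ih n (shown ++ [pvSq x]) (by simp) (by simp at hn ⊢; omega) c h)


lemma pvMain (rem : List String) : ∀ (n : Nat) (mx : Int) (shown : List (List Char)), shown ≠ [] →
    n = shown.length + rem.length →
    pvALoop mx rem (PySem.Chars.join ", ".toList shown ++ ", ".toList) (pvCand n shown)
      = (match ((pvBCands n rem shown).filter
            (fun c => decide ((c.length : Int) ≤ mx))).getLast? with
         | some c => c
         | none => pvCand n shown) := by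
  induction rem with
  | nil => intro n mx shown _ _; simp [pvALoop, pvBCands]
  | cons x xs ih =>
    intro n mx shown hne hn
    have hj := pvJoinSnoc shown (pvSq x) hne
    have hrest : n - (shown.length + 1) = xs.length := by simp at hn; omega
    have hcoll :
        (if xs.length > 0 then (PySem.Chars.join ", ".toList shown ++ ", ".toList ++ pvSq x) ++ pvSfx xs.length
         else (PySem.Chars.join ", ".toList shown ++ ", ".toList ++ pvSq x)) = pvCand n (shown ++ [pvSq x]) := by
      simp only [pvCand, hj, List.length_append, List.length_cons, List.length_nil, hrest]
      by_cases h0 : xs.length = 0 <;> simp [h0, List.append_assoc]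
    rw [pvBCandsCons]
    by_cases hfit : ((pvCand n (shown ++ [pvSq x])).length : Int) ≤ mx
    · -- candidate fits: A records it and goes on; B keeps it in the filter
      simp only [pvALoop]
      rw [hcoll, if_neg (not_lt.mpr hfit), ← hj]
      rw [ih n mx (shown ++ [pvSq x]) (by simp) (by simp at hn ⊢; omega)]
      rw [List.filter_cons_of_pos (by simpa using hfit), List.getLast?_cons]
      cases h : ((pvBCands n xs (shown ++ [pvSq x])).filter
          (fun c => decide ((c.length : Int) ≤ mx))).getLast?
      · simp
      · simp
    · -- candidate overflows: A returns the previous name, B's filter keeps nothing more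
      have hnil : ((pvBCands n xs (shown ++ [pvSq x])).filter
          (fun c => decide ((c.length : Int) ≤ mx))) = [] := by
        rw [List.filter_eq_nil_iff]
        intro c hc
        have := pvCandMono xs n (shown ++ [pvSq x]) (by simp) (by simp at hn ⊢; omega) c hc
        simp only [decide_eq_true_eq]
        intro hle
        exact hfit (le_trans (by exact_mod_cast Int.ofNat_le.mpr this) hle)
      simp only [pvALoop]
      rw [hcoll, if_pos (not_le.mp hfit),
        if_neg (pvCandNeNil n shown (by simp at hn; omega)),
        List.filter_cons_of_neg (by simpa using hfit), hnil]
      rfl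

lemma pvJoinSingleton (q : List Char) : PySem.Chars.join ", ".toList [q] = q := by
  simp [PySem.Chars.join, List.intercalate]

theorem pvTop (surface_names : List String) (mx : Int) (h : surface_names ≠ []) :
    surface_collection_name surface_names mx = surface_collection_name_alt surface_names mx := by
  obtain ⟨x, xs, rfl⟩ := List.exists_cons_of_ne_nil h
  set n := (x :: xs).length with hn
  have hn' : n = xs.length + 1 := by simp [hn]
  have hc0 : (if xs.length > 0 then pvSq x ++ pvSfx xs.length else pvSq x) = pvCand n [pvSq x] := by
    simp only [pvCand, pvJoinSingleton, List.length_cons, List.length_nil, hn']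
    by_cases h0 : xs.length = 0 <;> simp [h0]
  have hBC : pvBCands n (x :: xs) [] = pvCand n [pvSq x] :: pvBCands n xs [pvSq x] := by
    simpa using pvBCandsCons n x xs []
  simp only [surface_collection_name, surface_collection_name_alt]
  rw [if_neg (by simp)]
  rw [hBC]
  by_cases hfit : ((pvCand n [pvSq x]).length : Int) ≤ mx
  · have hA : pvALoop mx (x :: xs) [] [] =
        pvALoop mx xs (PySem.Chars.join ", ".toList [pvSq x] ++ ", ".toList) (pvCand n [pvSq x]) := by
      simp only [pvALoop, List.nil_append]
      rw [hc0, if_neg (not_lt.mpr hfit), pvJoinSingleton]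
    rw [hA, pvMain xs n mx [pvSq x] (by simp) (by simp [hn']; omega)]
    rw [List.filter_cons_of_pos (by simpa using hfit), List.getLast?_cons]
    cases hl : ((pvBCands n xs [pvSq x]).filter (fun c => decide ((c.length : Int) ≤ mx))).getLast?
    · simp
    · simp
  · have hnil : ((pvBCands n xs [pvSq x]).filter (fun c => decide ((c.length : Int) ≤ mx))) = [] := by
      rw [List.filter_eq_nil_iff]
      intro c hc
      have := pvCandMono xs n [pvSq x] (by simp) (by simp [hn']; omega) c hc
      simp only [decide_eq_true_eq]
      intro hle
      exact hfit (le_trans (by exact_mod_cast Int.ofNat_le.mpr this) hle)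
    have hA : pvALoop mx (x :: xs) [] [] =
        PySem.List.slice (pvSq x) none (some (mx - 4)) ++ "...".toList := by
      simp only [pvALoop, List.nil_append]
      rw [hc0, if_pos (not_le.mp hfit)]
      simp
    rw [hA, List.filter_cons_of_neg (by simpa using hfit), hnil]
    simp

-- ===== VERDICT (by name: the statement is the Claim_ definition above) =====
theorem surface_collection_name_spec : Claim_equal_surface_collection_name := by
  intro surface_names max_total_length _ hpre
  unfold Spec_surface_collection_name
  exact pvTop surface_names max_total_length hpre

@[simp] theorem surface_collection_name_raises : Claim_raises_surface_collection_name := by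
  unfold Claim_raises_surface_collection_name
  exact ⟨fun _ _ _ h hp => hp h, by decide⟩
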